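-- pv_equiv track=rewrite | github.com/ihmeuw/ihme-modeling | gbd_2021/shared_code/central_comp/nonfatal/como/common.py | cap_val
-- ===== SOURCE A (Python) =====
-- def cap_val(val_list, ref_list):
--     """Given a list of numerical values val_list, find the upper and lower
--     nearest neighbors and any interior neighbors in ref_list"""
--     assert val_list and (
--         len(ref_list) > 1
--     ), "val_list must have at least 1 value, ref_list at least 2"
--     lower = [ref for ref in ref_list if all(val >= ref for val in val_list)]
--     if lower:
--         lower = max(lower)
--     else:
--         raise ValueError(
--             f"The lowest value {min(ref_list)} is greater "
--             f"than the lowest value in {min(val_list)}. "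
--             "Your reference list may need to be updated"
--         )
--     upper = [ref for ref in ref_list if all(val <= ref for val in val_list)]
--     if upper:
--         upper = min(upper)
--     else:
--         raise ValueError(
--             f"The greatest value {max(ref_list)} is less "
--             f"than the greatest value in {max(val_list)}. "
--             "Your reference list may need to be updated"
--         )
--     inner_list = [ref for ref in ref_list if min(val_list) < ref < max(val_list)]
--     return [lower, upper] + inner_list
-- ===== SOURCE B (Python) =====
-- def cap_val(val_list, ref_list):
--     """Given a list of numerical values val_list, find the upper and lower
--     nearest neighbors and any interior neighbors in ref_list"""
--     assert val_list and (
--         len(ref_list) > 1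
--     ), "val_list must have at least 1 value, ref_list at least 2"
--     mn = min(val_list)
--     mx = max(val_list)
--     lower = None
--     upper = None
--     inner = []
--     for ref in ref_list:
--         if ref <= mn and (lower is None or lower < ref):
--             lower = ref
--         if mx <= ref and (upper is None or ref < upper):
--             upper = ref
--         if mn < ref < mx:
--             inner.append(ref)
--     if lower is None:
--         raise ValueError(
--             f"The lowest value {min(ref_list)} is greater "
--             f"than the lowest value in {mn}. "
--             "Your reference list may need to be updated"
--         )
--     if upper is None:
--         raise ValueError(
--             f"The greatest value {max(ref_list)} is less "
--             f"than the greatest value in {mx}. "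
--             "Your reference list may need to be updated"
--         )
--     return [lower, upper] + inner
-- ===== Notes on version B (the rewrite author's own statement) =====
-- stated objective: faster
-- what changed: Instead of three full-list comprehensions each re-scanning val_list (and repeated min/max calls), B computes min/max of val_list once and makes a single pass over ref_list maintaining the running lower neighbor, upper neighbor and interior list.
import Mathlib
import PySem

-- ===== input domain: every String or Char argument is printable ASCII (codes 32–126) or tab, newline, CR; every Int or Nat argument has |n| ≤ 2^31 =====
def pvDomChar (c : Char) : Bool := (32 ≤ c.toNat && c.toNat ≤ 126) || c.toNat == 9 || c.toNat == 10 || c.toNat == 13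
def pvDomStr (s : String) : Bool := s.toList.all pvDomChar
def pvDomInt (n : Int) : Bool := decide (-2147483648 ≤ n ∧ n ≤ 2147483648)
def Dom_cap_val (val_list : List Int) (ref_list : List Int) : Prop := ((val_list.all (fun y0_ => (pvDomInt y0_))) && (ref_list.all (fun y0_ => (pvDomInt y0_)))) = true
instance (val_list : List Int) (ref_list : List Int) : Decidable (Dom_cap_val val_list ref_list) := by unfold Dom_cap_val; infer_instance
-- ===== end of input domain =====

-- B replaces A's three full-list comprehensions (each re-scanning val_list) by one min/max
-- of val_list and a single pass over ref_list: O(n+m) instead of O(n*m). Return value only.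

-- ===== PORT A =====
-- literal port of A; the `else []`/`none => []` branches are A's assert/ValueError, excluded by Pre_
def cap_val (val_list : List Int) (ref_list : List Int) : List Int :=
  if val_list ≠ [] ∧ 1 < ref_list.length then
    let lowerL := ref_list.filter (fun r => val_list.all (fun v => decide (r ≤ v)))
    match PySem.List.max? lowerL (fun y => y) with
    | none => []  -- raise ValueError
    | some lower =>
      let upperL := ref_list.filter (fun r => val_list.all (fun v => decide (v ≤ r)))
      match PySem.List.min? upperL (fun y => y) with
      | none => []  -- raise ValueError
      | some upper =>
        let mn := (PySem.List.min? val_list (fun y => y)).getD 0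
        let mx := (PySem.List.max? val_list (fun y => y)).getD 0
        [lower, upper] ++ ref_list.filter (fun r => decide (mn < r) && decide (r < mx))
  else []  -- assert fails

-- ===== PORT B =====
-- one step of B's single pass: update running lower, upper, interior list
def capStep (mn mx : Int) : Option Int × Option Int × List Int → Int → Option Int × Option Int × List Int
  | (lo, up, inner), r =>
    ( if r ≤ mn && lo.all (fun l => decide (l < r)) then some r else lo,
      if mx ≤ r && up.all (fun u => decide (r < u)) then some r else up,
      if mn < r && r < mx then inner ++ [r] else inner )

def cap_val_alt (val_list : List Int) (ref_list : List Int) : List Int :=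
  match val_list with
  | [] => []  -- assert fails
  | v :: vs =>
    if 1 < ref_list.length then
      let mn := vs.foldl min v
      let mx := vs.foldl max v
      match ref_list.foldl (capStep mn mx) (none, none, []) with
      | (some lower, some upper, inner) => [lower, upper] ++ inner
      | _ => []  -- raise ValueError
    else []  -- assert fails

-- ===== PRECONDITION & SPEC =====
-- A raises (assert or ValueError) exactly when val_list is empty, ref_list has < 2 elements,
-- or no ref bounds val_list from below / from above; Pre_ excludes exactly those inputs.
def Pre_cap_val (val_list : List Int) (ref_list : List Int) : Prop :=
  val_list ≠ [] ∧ 1 < ref_list.length ∧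
  (∃ r ∈ ref_list, ∀ v ∈ val_list, r ≤ v) ∧
  (∃ r ∈ ref_list, ∀ v ∈ val_list, v ≤ r)
instance (val_list : List Int) (ref_list : List Int) : Decidable (Pre_cap_val val_list ref_list) := by
  unfold Pre_cap_val; infer_instance

def pvWitness_cap_val : List Int × List Int := ([1, 2], [0, 3])

def Spec_cap_val (val_list : List Int) (ref_list : List Int) (out : List Int) : Prop := out = cap_val_alt val_list ref_list
instance (val_list : List Int) (ref_list : List Int) (out : List Int) : Decidable (Spec_cap_val val_list ref_list out) := by unfold Spec_cap_val; infer_instance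

-- ===== CLAIM (what is proved, stated in full; the proofs are below) =====
def Claim_equal_cap_val : Prop := ∀ (val_list : List Int) (ref_list : List Int), Dom_cap_val val_list ref_list → Pre_cap_val val_list ref_list → Spec_cap_val val_list ref_list (cap_val val_list ref_list)

-- ===== LEMMAS AND PROOFS =====

theorem le_foldl_min (r v : Int) (vs : List Int) :
    r ≤ vs.foldl min v ↔ r ≤ v ∧ ∀ x ∈ vs, r ≤ x := by
  induction vs generalizing v with
  | nil => simp
  | cons w ws ih =>
    simp only [List.foldl_cons, ih, le_min_iff, List.mem_cons]
    constructor
    · rintro ⟨⟨h1, h2⟩, h3⟩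
      refine ⟨h1, ?_⟩
      intro x hx
      rcases hx with rfl | hx
      · exact h2
      · exact h3 x hx
    · rintro ⟨h1, h2⟩
      exact ⟨⟨h1, h2 w (Or.inl rfl)⟩, fun x hx => h2 x (Or.inr hx)⟩

theorem foldl_max_le (r v : Int) (vs : List Int) :
    vs.foldl max v ≤ r ↔ v ≤ r ∧ ∀ x ∈ vs, x ≤ r := by
  induction vs generalizing v with
  | nil => simp
  | cons w ws ih =>
    simp only [List.foldl_cons, ih, max_le_iff, List.mem_cons]
    constructor
    · rintro ⟨⟨h1, h2⟩, h3⟩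
      refine ⟨h1, ?_⟩
      intro x hx
      rcases hx with rfl | hx
      · exact h2
      · exact h3 x hx
    · rintro ⟨h1, h2⟩
      exact ⟨⟨h1, h2 w (Or.inl rfl)⟩, fun x hx => h2 x (Or.inr hx)⟩

theorem all_le_min (r v : Int) (vs : List Int) :
    (v :: vs).all (fun x => decide (r ≤ x)) = decide (r ≤ vs.foldl min v) := by
  rw [Bool.eq_iff_iff]
  simp [List.all_eq_true, le_foldl_min]

theorem all_max_le (r v : Int) (vs : List Int) :
    (v :: vs).all (fun x => decide (x ≤ r)) = decide (vs.foldl max v ≤ r) := by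
  rw [Bool.eq_iff_iff]
  simp [List.all_eq_true, foldl_max_le]

theorem max?_id_append_singleton (F : List Int) (r : Int) :
    PySem.List.max? (F ++ [r]) (fun y => y) =
      some (match PySem.List.max? F (fun y => y) with | none => r | some m => max m r) := by
  cases F with
  | nil =>
    simp [PySem.List.max?_id_cons]
    rfl
  | cons x t =>
    simp [PySem.List.max?_id_cons, List.foldl_append]

theorem min?_id_append_singleton (F : List Int) (r : Int) :
    PySem.List.min? (F ++ [r]) (fun y => y) =
      some (match PySem.List.min? F (fun y => y) with | none => r | some m => min m r) := by
  cases F with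
  | nil =>
    simp [PySem.List.min?_id_cons]
    rfl
  | cons x t =>
    simp [PySem.List.min?_id_cons, List.foldl_append]

-- the single pass computes exactly A's three comprehensions
theorem capLoop_spec (mn mx : Int) (refs : List Int) :
    refs.foldl (capStep mn mx) (none, none, []) =
      (PySem.List.max? (refs.filter (fun r => decide (r ≤ mn))) (fun y => y),
       PySem.List.min? (refs.filter (fun r => decide (mx ≤ r))) (fun y => y),
       refs.filter (fun r => decide (mn < r) && decide (r < mx))) := by
  induction refs using List.reverseRecOn with
  | nil => rfl
  | append_singleton refs r ih =>
    rw [List.foldl_append, ih]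
    simp only [List.foldl_cons, List.foldl_nil, List.filter_append, List.filter_cons,
      List.filter_nil, capStep]
    by_cases h1 : r ≤ mn <;> by_cases h2 : mx ≤ r <;>
      simp only [h1, h2, decide_true, decide_false, Bool.true_and, Bool.false_and,
        if_true, Bool.false_eq_true, if_false, List.append_nil,
        max?_id_append_singleton, min?_id_append_singleton, Prod.mk.injEq]
    all_goals refine ⟨?_, ?_, ?_⟩
    all_goals first
      | (cases hF : PySem.List.max? (refs.filter (fun r => decide (r ≤ mn))) (fun y => y) with
          | none => simp
          | some m => by_cases hm : m < r <;> simp [hm] <;> omega)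
      | (cases hG : PySem.List.min? (refs.filter (fun r => decide (mx ≤ r))) (fun y => y) with
          | none => simp
          | some m => by_cases hm : r < m <;> simp [hm] <;> omega)
      | (by_cases h3 : mn < r <;> by_cases h4 : r < mx <;> simp [h3, h4])

-- ===== VERDICT (by name: the statement is the Claim_ definition above) =====
theorem cap_val_spec : Claim_equal_cap_val := by
  intro val_list ref_list _ hpre
  obtain ⟨hne, hlen, ⟨rl, hrl, hrlo⟩, ⟨ru, hru, hrhi⟩⟩ := hpre
  unfold Spec_cap_val
  cases val_list with
  | nil => exact absurd rfl hne
  | cons v vs =>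
    have hA : cap_val (v :: vs) ref_list =
        (let lowerL := ref_list.filter (fun r => (v :: vs).all (fun x => decide (r ≤ x)))
         match PySem.List.max? lowerL (fun y => y) with
         | none => []
         | some lower =>
           let upperL := ref_list.filter (fun r => (v :: vs).all (fun x => decide (x ≤ r)))
           match PySem.List.min? upperL (fun y => y) with
           | none => []
           | some upper =>
             let mn := (PySem.List.min? (v :: vs) (fun y => y)).getD 0
             let mx := (PySem.List.max? (v :: vs) (fun y => y)).getD 0
             [lower, upper] ++ ref_list.filter (fun r => decide (mn < r) && decide (r < mx))) := by
      unfold cap_val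
      rw [if_pos ⟨by simp, hlen⟩]
    have hB : cap_val_alt (v :: vs) ref_list =
        (let mn := vs.foldl min v
         let mx := vs.foldl max v
         match ref_list.foldl (capStep mn mx) (none, none, []) with
         | (some lower, some upper, inner) => [lower, upper] ++ inner
         | _ => []) := by
      simp [cap_val_alt, hlen]
    rw [hA, hB]
    simp only []
    rw [capLoop_spec]
    have hmin : ∀ r : Int, (List.all (v :: vs) fun x => decide (r ≤ x)) = decide (r ≤ vs.foldl min v) :=
      fun r => all_le_min r v vs
    have hmax : ∀ r : Int, (List.all (v :: vs) fun x => decide (x ≤ r)) = decide (vs.foldl max v ≤ r) :=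
      fun r => all_max_le r v vs
    have hfl : ref_list.filter (fun r => (v :: vs).all (fun x => decide (r ≤ x)))
        = ref_list.filter (fun r => decide (r ≤ vs.foldl min v)) := by
      apply List.filter_congr; intro r _; exact hmin r
    have hfu : ref_list.filter (fun r => (v :: vs).all (fun x => decide (x ≤ r)))
        = ref_list.filter (fun r => decide (vs.foldl max v ≤ r)) := by
      apply List.filter_congr; intro r _; exact hmax r
    simp only [hfl, hfu, PySem.List.min?_id_cons, PySem.List.max?_id_cons, Option.getD_some]
    have hLne : ref_list.filter (fun r => decide (r ≤ vs.foldl min v)) ≠ [] := by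
      intro h
      have : rl ∈ ref_list.filter (fun r => decide (r ≤ vs.foldl min v)) := by
        rw [List.mem_filter]
        exact ⟨hrl, by simp [le_foldl_min]; exact ⟨hrlo v (by simp), fun x hx => hrlo x (by simp [hx])⟩⟩
      simp [h] at this
    have hUne : ref_list.filter (fun r => decide (vs.foldl max v ≤ r)) ≠ [] := by
      intro h
      have : ru ∈ ref_list.filter (fun r => decide (vs.foldl max v ≤ r)) := by
        rw [List.mem_filter]
        exact ⟨hru, by simp [foldl_max_le]; exact ⟨hrhi v (by simp), fun x hx => hrhi x (by simp [hx])⟩⟩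
      simp [h] at this
    cases hL : PySem.List.max? (ref_list.filter (fun r => decide (r ≤ vs.foldl min v))) (fun y => y) with
    | none => exact absurd ((PySem.List.max?_eq_none_iff _ _).mp hL) hLne
    | some lower =>
      cases hU : PySem.List.min? (ref_list.filter (fun r => decide (vs.foldl max v ≤ r))) (fun y => y) with
      | none => exact absurd ((PySem.List.min?_eq_none_iff _ _).mp hU) hUne
      | some upper => rfl
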